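-- pv_equiv track=rewrite | github.com/TechTyphoon/smartcloudops-ai | fix_all_syntax_errors.py | fix_import_statements
-- ===== SOURCE A (Python) =====
-- def fix_import_statements(content):
--     """Fix split import statements"""
--     lines = content.split('\n')
--     fixed_lines = []
--     i = 0
--
--     while i < len(lines):
--         line = lines[i]
--
--         # Fix split imports
--         if 'from app.performance.api_optimization import (' in line:
--             if i + 1 < len(lines) and 'shutdown_performance_monitoring' in lines[i + 1]:
--                 fixed_lines.append('                from app.performance.api_optimization import shutdown_performance_monitoring')
--                 i += 2
--                 continue
--
--         fixed_lines.append(line)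
--         i += 1
--
--     return '\n'.join(fixed_lines)
-- ===== SOURCE B (Python) =====
-- _MERGED = '                from app.performance.api_optimization import shutdown_performance_monitoring'
--
-- def fix_import_statements(content):
--     """Fix split import statements: single pass carrying at most one pending line."""
--     out = []
--     pending = None
--     for line in content.split('\n'):
--         if pending is not None:
--             if 'shutdown_performance_monitoring' in line:
--                 out.append(_MERGED)
--                 pending = None
--                 continue
--             out.append(pending)
--             pending = None
--         if 'from app.performance.api_optimization import (' in line:
--             pending = line
--         else:
--             out.append(line)
--     if pending is not None:
--         out.append(pending)
--     return '\n'.join(out)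
-- ===== Notes on version B (the rewrite author's own statement) =====
-- stated objective: simpler
-- what changed: Replaces A's index-based while loop with i+=2/continue skip logic by a single for-pass over the lines that carries at most one pending candidate line and flushes it at the end.
import Mathlib
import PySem

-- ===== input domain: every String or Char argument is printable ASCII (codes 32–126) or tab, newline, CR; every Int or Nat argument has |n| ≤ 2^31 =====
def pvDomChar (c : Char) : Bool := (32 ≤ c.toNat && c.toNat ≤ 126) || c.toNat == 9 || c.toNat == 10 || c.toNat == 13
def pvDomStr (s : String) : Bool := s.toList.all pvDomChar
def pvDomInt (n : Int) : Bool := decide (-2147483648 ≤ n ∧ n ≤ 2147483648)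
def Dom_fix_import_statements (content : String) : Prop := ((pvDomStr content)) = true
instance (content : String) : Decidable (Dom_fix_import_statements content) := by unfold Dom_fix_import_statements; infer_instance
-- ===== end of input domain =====

-- B replaces A's index loop with skip-two (`i += 2; continue`) by a single pass that
-- carries at most one pending line; objective: simpler/alternative, same cost.

-- shared string constants of both Pythons
def pvPat (l : String) : Bool := PySem.Str.isIn "from app.performance.api_optimization import (" l
def pvTok (l : String) : Bool := PySem.Str.isIn "shutdown_performance_monitoring" l
def pvMerged : String := "                from app.performance.api_optimization import shutdown_performance_monitoring"

-- ===== PORT A =====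
-- A's while-loop over index i, transcribed as recursion on the suffix lines[i:]
def loopA : List String → List String
  | [] => []
  | l :: rest =>
    if pvPat l then
      match rest with
      | l2 :: rest2 =>
          if pvTok l2 then pvMerged :: loopA rest2
          else l :: loopA (l2 :: rest2)
      | [] => l :: loopA []
    else l :: loopA rest

def fix_import_statements (content : String) : String :=
  PySem.Str.join "\n" (loopA ((PySem.Str.split? content "\n").getD []))

-- ===== PORT B =====
-- Source B's loop body: state = (reversed output so far, pending line)
def stepB (s : List String × Option String) (line : String) : List String × Option String :=
  match s with
  | (acc, some p) =>
    if pvTok line then (pvMerged :: acc, none)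
    else if pvPat line then (p :: acc, some line)
    else (line :: p :: acc, none)
  | (acc, none) =>
    if pvPat line then (acc, some line)
    else (line :: acc, none)

-- Source B's trailing 'if pending is not None: out.append(pending)'
def finishB : List String × Option String → List String
  | (acc, some p) => (p :: acc).reverse
  | (acc, none) => acc.reverse

def fix_import_statements_alt (content : String) : String :=
  PySem.Str.join "\n" (finishB (((PySem.Str.split? content "\n").getD []).foldl stepB ([], none)))

-- ===== PRECONDITION & SPEC =====
def Spec_fix_import_statements (content : String) (out : String) : Prop := out = fix_import_statements_alt content
instance (content : String) (out : String) : Decidable (Spec_fix_import_statements content out) := by unfold Spec_fix_import_statements; infer_instance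

-- ===== CLAIM (what is proved, stated in full; the proofs are below) =====
def Claim_equal_fix_import_statements : Prop := ∀ (content : String), Dom_fix_import_statements content → Spec_fix_import_statements content (fix_import_statements content)

-- ===== LEMMAS AND PROOFS =====
-- equation of loopA at a non-pattern head (the match on the tail makes simp need it)
lemma loopA_cons_not (l : String) (ls : List String) (h : ¬ pvPat l = true) :
    loopA (l :: ls) = l :: loopA ls := by
  cases ls <;> simp [loopA, h]
-- joint loop invariant: B's fold from state (acc, pending) produces acc.reverse ++ A's loop
-- on the remaining lines (with the pending line, which always satisfies pvPat, put back in front)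
lemma fold_loop_eq (ls : List String) :
    (∀ acc, finishB (ls.foldl stepB (acc, none)) = acc.reverse ++ loopA ls) ∧
    (∀ acc p, pvPat p = true →
      finishB (ls.foldl stepB (acc, some p)) = acc.reverse ++ loopA (p :: ls)) := by
  induction ls with
  | nil =>
      refine ⟨fun acc => by simp [finishB, loopA], fun acc p hp => ?_⟩
      simp [finishB, loopA, hp]
  | cons l ls ih =>
      refine ⟨fun acc => ?_, fun acc p hp => ?_⟩
      · by_cases hp : pvPat l
        · simpa [stepB, hp, loopA] using ih.2 acc l hp
        · have h1 := ih.1 (l :: acc)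
          simp at h1
          simp [stepB, hp, loopA_cons_not l ls hp, h1]
        -- branch: no pattern, line just appended
      · by_cases ht : pvTok l
        · have h1 := ih.1 (pvMerged :: acc)
          simp [stepB, ht, loopA, hp] at h1 ⊢
          simp [h1]
        · by_cases hq : pvPat l
          · have h2 := ih.2 (p :: acc) l hq
            simp [stepB, ht, hq, loopA, hp] at h2 ⊢
            simp [h2]
          · have h1 := ih.1 (l :: p :: acc)
            simp at h1
            simp [stepB, ht, hq, loopA, hp, loopA_cons_not l ls hq, h1]

-- ===== VERDICT (by name: the statement is the Claim_ definition above) =====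
theorem fix_import_statements_spec : Claim_equal_fix_import_statements := by
  intro content _
  unfold Spec_fix_import_statements fix_import_statements fix_import_statements_alt
  rw [(fold_loop_eq ((PySem.Str.split? content "\n").getD [])).1 []]
  simp
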